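-- pv_equiv track=rewrite | github.com/SDM-TIB/KGSaw | fragmentor/functions.py | fd_determination
-- ===== SOURCE A (Python) =====
-- def fd_determination(subject_attr,po_attr,fd):
--     for attr in subject_attr:
--         for po in po_attr:
--             if po in fd:
--                 if attr not in fd[po]:
--                     return False
--             else:
--                 return False
--     return True
-- ===== SOURCE B (Python) =====
-- def fd_determination(subject_attr, po_attr, fd):
--     if not subject_attr:
--         return True
--     for po in po_attr:
--         if po not in fd:
--             return False
--     common = set(subject_attr)
--     for po in po_attr:
--         common &= set(fd[po])
--     return common == set(subject_attr)
-- ===== Notes on version B (the rewrite author's own statement) =====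
-- stated objective: alternative
-- what changed: Replaces A's single nested attr/po loop with three stages: an empty-subject short-circuit, a key-presence pass over po_attr, and a set-intersection of the fd[po] collections compared against set(subject_attr).
import Mathlib
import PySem

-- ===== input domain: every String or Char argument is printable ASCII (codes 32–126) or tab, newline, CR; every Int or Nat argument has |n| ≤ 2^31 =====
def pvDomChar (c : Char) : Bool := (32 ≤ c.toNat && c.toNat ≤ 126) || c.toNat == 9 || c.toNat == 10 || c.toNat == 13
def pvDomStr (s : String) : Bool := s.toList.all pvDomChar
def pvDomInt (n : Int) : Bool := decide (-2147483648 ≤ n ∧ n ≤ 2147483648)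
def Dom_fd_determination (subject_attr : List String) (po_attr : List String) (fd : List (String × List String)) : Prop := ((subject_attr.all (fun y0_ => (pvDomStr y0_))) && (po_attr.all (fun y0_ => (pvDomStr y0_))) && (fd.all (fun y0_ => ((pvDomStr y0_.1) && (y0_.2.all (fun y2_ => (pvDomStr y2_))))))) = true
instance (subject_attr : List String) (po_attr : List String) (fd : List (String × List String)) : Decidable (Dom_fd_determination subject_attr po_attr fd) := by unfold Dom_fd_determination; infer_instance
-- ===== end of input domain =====

-- B replaces A's nested attr/po loop by a key-presence pass plus a set-intersection/equality check (alternative decomposition).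
-- ===== PORT A =====
-- for attr in subject_attr: for po in po_attr: if po in fd: if attr not in fd[po]: return False else: return False; return True
def fd_determination (subject_attr : List String) (po_attr : List String) (fd : List (String × List String)) : Bool :=
  subject_attr.all (fun attr =>
    po_attr.all (fun po =>
      match (PySem.Dict.mk fd).get? po with
      | some v => v.contains attr
      | none => false))

-- ===== PORT B =====
def fd_determination_alt (subject_attr : List String) (po_attr : List String) (fd : List (String × List String)) : Bool :=
  if subject_attr.isEmpty then true
  else if po_attr.any (fun po => ((PySem.Dict.mk fd).get? po).isNone) then false
  else
    let base := PySem.Set.ofList subject_attr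
    let common := po_attr.foldl
      (fun acc po => PySem.Set.inter acc (PySem.Set.ofList ((PySem.Dict.mk fd).getD po []))) base
    PySem.Set.equal common base

-- ===== PRECONDITION & SPEC =====
def Spec_fd_determination (subject_attr : List String) (po_attr : List String) (fd : List (String × List String)) (out : Bool) : Prop := out = fd_determination_alt subject_attr po_attr fd
instance (subject_attr : List String) (po_attr : List String) (fd : List (String × List String)) (out : Bool) : Decidable (Spec_fd_determination subject_attr po_attr fd out) := by unfold Spec_fd_determination; infer_instance

-- ===== CLAIM (what is proved, stated in full; the proofs are below) =====
def Claim_equal_fd_determination : Prop := ∀ (subject_attr : List String) (po_attr : List String) (fd : List (String × List String)), Dom_fd_determination subject_attr po_attr fd → Spec_fd_determination subject_attr po_attr fd (fd_determination subject_attr po_attr fd)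

-- ===== LEMMAS AND PROOFS =====

-- the intersection fold is one filter by the conjunction of the memberships
theorem pv_foldl_inter (pa : List String) (s : List String) (f : String → List String) :
    pa.foldl (fun acc po => PySem.Set.inter acc (f po)) s
      = s.filter (fun x => pa.all (fun po => (f po).contains x)) := by
  induction pa generalizing s with
  | nil => simp
  | cons p rest ih =>
      rw [List.foldl_cons, ih]
      simp only [PySem.Set.inter, PySem.Set.contains, List.filter_filter]
      apply List.filter_congr
      intro x _
      simp [Bool.and_comm]

-- set(filter) == set(s) iff every element of s passes the filter
theorem pv_equal_filter (s : List String) (p : String → Bool) :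
    PySem.Set.equal (s.filter p) s = s.all p := by
  simp only [PySem.Set.equal, PySem.Set.issubset, PySem.Set.contains]
  by_cases h : s.all p = true
  · rw [h]
    have h' := List.all_eq_true.mp h
    rw [Bool.and_eq_true]
    constructor
    · rw [List.all_eq_true]
      intro x hx
      exact List.contains_iff_mem.mpr (List.mem_filter.mp hx).1
    · rw [List.all_eq_true]
      intro x hx
      exact List.contains_iff_mem.mpr (List.mem_filter.mpr ⟨hx, h' x hx⟩)
  · rw [Bool.eq_false_iff.mpr h, Bool.eq_false_iff]
    intro hc
    apply h
    rw [Bool.and_eq_true, List.all_eq_true, List.all_eq_true] at hc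
    rw [List.all_eq_true]
    intro x hx
    exact (List.mem_filter.mp (List.contains_iff_mem.mp (hc.2 x hx))).2

-- all over set(sa) = all over sa (the predicate only depends on membership)
theorem pv_all_ofList (sa : List String) (p : String → Bool) :
    (PySem.Set.ofList sa).all p = sa.all p := by
  by_cases h : sa.all p = true
  · rw [h, List.all_eq_true]
    intro x hx
    exact List.all_eq_true.mp h x ((PySem.Set.mem_ofList _ _).mp hx)
  · rw [Bool.eq_false_iff.mpr h, Bool.eq_false_iff]
    intro hc
    apply h
    rw [List.all_eq_true] at hc ⊢
    intro x hx
    exact hc x ((PySem.Set.mem_ofList _ _).mpr hx)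

-- all respects pointwise equality on members
theorem pv_all_congr_mem {α : Type} (l : List α) (p q : α → Bool)
    (h : ∀ x ∈ l, p x = q x) : l.all p = l.all q := by
  induction l with
  | nil => rfl
  | cons a t ih =>
      simp only [List.all_cons, h a (List.mem_cons_self), ih (fun x hx => h x (List.mem_cons_of_mem _ hx))]

-- ===== VERDICT (by name: the statement is the Claim_ definition above) =====
theorem fd_determination_spec : Claim_equal_fd_determination := by
  intro sa pa fd _
  unfold Spec_fd_determination fd_determination fd_determination_alt
  by_cases hsa : sa.isEmpty
  · rw [List.isEmpty_iff.mp hsa]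
    simp
  · rw [if_neg (by simp [hsa])]
    by_cases hmiss : pa.any (fun po => ((PySem.Dict.mk fd).get? po).isNone)
    · rw [if_pos hmiss]
      obtain ⟨a, rest, hrest⟩ := List.ne_nil_iff_exists_cons.mp (by simpa [List.isEmpty_iff] using hsa)
      obtain ⟨po, hpo, hnone⟩ := List.any_eq_true.mp hmiss
      rw [List.all_eq_false]
      refine ⟨a, by simp [hrest], ?_⟩
      rw [Bool.not_eq_true, List.all_eq_false]
      refine ⟨po, hpo, ?_⟩
      rcases hh : (PySem.Dict.mk fd).get? po with _ | v
      · simp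
      · simp [hh] at hnone
    · rw [if_neg hmiss]
      show _ = PySem.Set.equal
        (pa.foldl (fun acc po => PySem.Set.inter acc (PySem.Set.ofList ((PySem.Dict.mk fd).getD po [])))
          (PySem.Set.ofList sa)) (PySem.Set.ofList sa)
      rw [pv_foldl_inter, pv_equal_filter, pv_all_ofList]
      have hkey : ∀ po ∈ pa, ∃ v, (PySem.Dict.mk fd).get? po = some v := by
        intro po hpo
        rcases hh : (PySem.Dict.mk fd).get? po with _ | v
        · exact absurd (List.any_eq_true.mpr ⟨po, hpo, by simp [hh]⟩) hmiss
        · exact ⟨v, rfl⟩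
      symm
      apply pv_all_congr_mem
      intro attr _
      apply pv_all_congr_mem
      intro po hpo
      obtain ⟨v, hv⟩ := hkey po hpo
      rw [hv]
      simp only [PySem.Dict.getD, hv, Option.getD_some]
      by_cases hm : attr ∈ v
      · rw [List.contains_iff_mem.mpr hm,
          List.contains_iff_mem.mpr ((PySem.Set.mem_ofList _ _).mpr hm)]
      · rw [Bool.eq_false_iff.mpr (fun hc => hm (List.contains_iff_mem.mp hc)),
          Bool.eq_false_iff.mpr (fun hc => hm ((PySem.Set.mem_ofList _ _).mp (List.contains_iff_mem.mp hc)))]
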